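-- pv_equiv track=rewrite | github.com/chridey/fixedthat | fixedthat/preprocessing/ftfy_utils.py | get_sentence_labels
-- ===== SOURCE A (Python) =====
-- def get_sentence_labels(parent, parent_range):
--     i = 0
--     labels = []
--
--     for sentence in parent:
--         length = len(sentence['words'])
--         sentence_labels = []
--         for j in range(i, i+length):
--             if j >= parent_range[0] and j <= parent_range[1]:
--                 sentence_labels.append(1)
--             else:
--                 sentence_labels.append(0)
--         i += length
--         labels.append(sentence_labels)
--
--     return labels
-- ===== SOURCE B (Python) =====
-- def get_sentence_labels(parent, parent_range):
--     labels = []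
--     i = 0
--     lo, hi = parent_range[0], parent_range[1]
--     for sentence in parent:
--         n = len(sentence['words'])
--         start = max(lo - i, 0)
--         end = min(hi - i, n - 1)
--         if start <= end:
--             labels.append([0] * start + [1] * (end - start + 1) + [0] * (n - 1 - end))
--         else:
--             labels.append([0] * n)
--         i += n
--     return labels
-- ===== Notes on version B (the rewrite author's own statement) =====
-- stated objective: simpler
-- what changed: Replaces the per-position index-membership loop with a closed-form row construction: each sentence's label row is built arithmetically as [0]*start + [1]*ones + [0]*rest from the clamped range bounds.
import Mathlib
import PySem

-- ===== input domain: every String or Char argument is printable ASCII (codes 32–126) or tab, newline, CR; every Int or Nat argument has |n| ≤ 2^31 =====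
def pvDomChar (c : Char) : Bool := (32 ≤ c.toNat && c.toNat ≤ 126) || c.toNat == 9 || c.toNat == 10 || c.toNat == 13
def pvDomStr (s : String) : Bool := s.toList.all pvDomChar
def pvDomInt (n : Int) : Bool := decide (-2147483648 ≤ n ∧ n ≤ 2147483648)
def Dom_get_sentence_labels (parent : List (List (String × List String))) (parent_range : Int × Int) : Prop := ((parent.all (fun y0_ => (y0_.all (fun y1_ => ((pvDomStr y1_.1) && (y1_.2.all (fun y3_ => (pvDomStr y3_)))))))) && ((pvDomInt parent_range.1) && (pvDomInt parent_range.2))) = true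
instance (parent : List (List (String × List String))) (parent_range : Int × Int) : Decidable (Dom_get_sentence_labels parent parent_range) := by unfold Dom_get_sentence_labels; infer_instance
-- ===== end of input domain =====

-- B builds each sentence's label row in closed form ([0]*start ++ [1]*ones ++ [0]*rest) instead of
-- testing every global position against the range; objective: simpler.

-- ===== PORT A =====
-- sentence['words'] : first-match lookup in the association list (raises KeyError if absent; excluded by Pre_)
def get_sentence_labels (parent : List (List (String × List String))) (parent_range : Int × Int) : List (List Int) :=
  (parent.foldl (fun (st : Int × List (List Int)) sentence =>
    let i := st.1
    let length : Int := PySem.List.len ((PySem.Dict.mk sentence).getD "words" [])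
    let sentence_labels : List Int :=
      (PySem.List.pyRange i (i + length) 1).foldl
        (fun acc j => acc ++ [if parent_range.1 ≤ j ∧ j ≤ parent_range.2 then (1 : Int) else 0]) []
    (i + length, st.2 ++ [sentence_labels])) (0, [])).2

-- ===== PORT B =====
-- one label row: [0]*start ++ [1]*(end-start+1) ++ [0]*(n-1-end), all zeros when start > end
def pvAltRow (lo hi i : Int) (n : Nat) : List Int :=
  let start := max (lo - i) 0
  let e := min (hi - i) ((n : Int) - 1)
  if start ≤ e then
    List.replicate start.toNat 0 ++ List.replicate (e - start + 1).toNat 1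
      ++ List.replicate ((n : Int) - 1 - e).toNat 0
  else
    List.replicate n 0

def pvAltGo (lo hi : Int) (i : Int) : List (List (String × List String)) → List (List Int)
  | [] => []
  | sentence :: rest =>
    let n := ((PySem.Dict.mk sentence).getD "words" []).length
    pvAltRow lo hi i n :: pvAltGo lo hi (i + n) rest

def get_sentence_labels_alt (parent : List (List (String × List String))) (parent_range : Int × Int) : List (List Int) :=
  pvAltGo parent_range.1 parent_range.2 0 parent

-- ===== PRECONDITION & SPEC =====
-- Pre_ excludes exactly the inputs on which A raises KeyError: a sentence dict without the 'words' key.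
def Pre_get_sentence_labels (parent : List (List (String × List String))) (parent_range : Int × Int) : Prop :=
  parent.all (fun sentence => ((PySem.Dict.mk sentence).get? "words").isSome) = true

instance (parent : List (List (String × List String))) (parent_range : Int × Int) : Decidable (Pre_get_sentence_labels parent parent_range) := by unfold Pre_get_sentence_labels; infer_instance

def pvWitness_get_sentence_labels : (List (List (String × List String))) × (Int × Int) :=
  ([[("words", ["a", "b"])], [("words", ["c"])]], (1, 2))

def Spec_get_sentence_labels (parent : List (List (String × List String))) (parent_range : Int × Int) (out : List (List Int)) : Prop := out = get_sentence_labels_alt parent parent_range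
instance (parent : List (List (String × List String))) (parent_range : Int × Int) (out : List (List Int)) : Decidable (Spec_get_sentence_labels parent parent_range out) := by unfold Spec_get_sentence_labels; infer_instance

-- ===== CLAIM (what is proved, stated in full; the proofs are below) =====
def Claim_equal_get_sentence_labels : Prop := ∀ (parent : List (List (String × List String))) (parent_range : Int × Int), Dom_get_sentence_labels parent parent_range → Pre_get_sentence_labels parent parent_range → Spec_get_sentence_labels parent parent_range (get_sentence_labels parent parent_range)

-- ===== LEMMAS AND PROOFS =====

lemma pv_foldl_append_map {α β : Type} (f : α → β) :
    ∀ (l : List α) (acc : List β), l.foldl (fun a x => a ++ [f x]) acc = acc ++ l.map f := by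
  intro l
  induction l with
  | nil => simp
  | cons x xs ih => intro acc; simp [List.foldl, ih]

-- the inner loop of A equals B's closed-form row
lemma pv_row_eq (lo hi : Int) : ∀ (n : Nat) (i : Int),
    (PySem.List.pyRange i (i + n) 1).map (fun j => if lo ≤ j ∧ j ≤ hi then (1 : Int) else 0)
      = pvAltRow lo hi i n := by
  intro n
  induction n with
  | zero =>
    intro i
    rw [show i + (0:Nat) = i by simp, PySem.List.pyRange_one_eq_nil le_rfl]
    simp only [pvAltRow, List.map_nil]
    rw [if_neg (by omega)]
    simp
  | succ n ih =>
    intro i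
    rw [PySem.List.pyRange_one_cons (by push_cast; omega)]
    rw [show i + ((n + 1 : Nat) : Int) = (i + 1) + n by push_cast; ring]
    simp only [List.map_cons]
    rw [ih (i + 1)]
    simp only [pvAltRow]
    push_cast
    by_cases hlo : lo ≤ i
    · by_cases hhi : i ≤ hi
      · -- f i = 1 : start = 0
        rw [if_pos ⟨hlo, hhi⟩]
        by_cases he : (1:Int) ≤ min (hi - i) ((n:Int) + 1 - 1)
        · rw [if_pos (by omega), if_pos (by omega)]
          rw [show (min (hi - (i+1)) ((n:Int) - 1) - max (lo - (i+1)) 0 + 1).toNat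
                = (min (hi - i) ((n:Int) + 1 - 1) - max (lo - i) 0 + 1).toNat - 1 by omega,
              show (max (lo - i) 0).toNat = 0 by omega,
              show (max (lo - (i+1)) 0).toNat = 0 by omega,
              show ((n:Int) - 1 - min (hi - (i+1)) ((n:Int) - 1)).toNat
                = ((n:Int) + 1 - 1 - min (hi - i) ((n:Int) + 1 - 1)).toNat by omega]
          simp only [List.replicate, List.nil_append]
          rw [show (min (hi - i) ((n:Int) + 1 - 1) - max (lo - i) 0 + 1).toNat
                = ((min (hi - i) ((n:Int) + 1 - 1) - max (lo - i) 0 + 1).toNat - 1) + 1 by omega]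
          simp [List.replicate_succ]
        · -- ones block has length exactly 1
          rw [if_neg (by omega), if_pos (by omega)]
          rw [show (max (lo - i) 0).toNat = 0 by omega,
              show (min (hi - i) ((n:Int) + 1 - 1) - max (lo - i) 0 + 1).toNat = 1 by omega,
              show ((n:Int) + 1 - 1 - min (hi - i) ((n:Int) + 1 - 1)).toNat = n by omega]
          simp
      · -- i > hi : everything zero on both sides
        rw [if_neg (by omega), if_neg (by omega), if_neg (by omega)]
        simp [List.replicate_succ]
    · -- i < lo : start ≥ 1
      rw [if_neg (by omega)]
      by_cases hse : max (lo - i) 0 ≤ min (hi - i) ((n:Int) + 1 - 1)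
      · rw [if_pos (by omega), if_pos (by omega)]
        rw [show (max (lo - (i+1)) 0).toNat = (max (lo - i) 0).toNat - 1 by omega,
            show (min (hi - (i+1)) ((n:Int) - 1) - max (lo - (i+1)) 0 + 1).toNat
              = (min (hi - i) ((n:Int) + 1 - 1) - max (lo - i) 0 + 1).toNat by omega,
            show ((n:Int) - 1 - min (hi - (i+1)) ((n:Int) - 1)).toNat
              = ((n:Int) + 1 - 1 - min (hi - i) ((n:Int) + 1 - 1)).toNat by omega]
        rw [show (max (lo - i) 0).toNat = ((max (lo - i) 0).toNat - 1) + 1 by omega]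
        simp [List.replicate_succ]
      · rw [if_neg (by omega), if_neg (by omega)]
        simp [List.replicate_succ]

-- the outer fold of A, run from any (i, acc), equals acc ++ B's recursion from i
lemma pv_fold_eq (lo hi : Int) : ∀ (parent : List (List (String × List String))) (i : Int) (acc : List (List Int)),
    (parent.foldl (fun (st : Int × List (List Int)) sentence =>
      let i := st.1
      let length : Int := PySem.List.len ((PySem.Dict.mk sentence).getD "words" [])
      let sentence_labels : List Int :=
        (PySem.List.pyRange i (i + length) 1).foldl
          (fun acc j => acc ++ [if lo ≤ j ∧ j ≤ hi then (1 : Int) else 0]) []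
      (i + length, st.2 ++ [sentence_labels])) (i, acc)).2
    = acc ++ pvAltGo lo hi i parent := by
  intro parent
  induction parent with
  | nil => intro i acc; simp [pvAltGo]
  | cons s rest ih =>
    intro i acc
    simp only [List.foldl, pvAltGo]
    rw [ih]
    rw [pv_foldl_append_map (fun j => if lo ≤ j ∧ j ≤ hi then (1 : Int) else 0)]
    simp only [List.nil_append, PySem.List.len_eq]
    rw [pv_row_eq lo hi]
    simp

-- ===== VERDICT (by name: the statement is the Claim_ definition above) =====
theorem get_sentence_labels_spec : Claim_equal_get_sentence_labels := by
  intro parent parent_range _ _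
  unfold Spec_get_sentence_labels get_sentence_labels get_sentence_labels_alt
  simpa using pv_fold_eq parent_range.1 parent_range.2 parent 0 []
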